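-- pv_equiv track=rewrite | github.com/Vivek-8877/GeeksForGeeks-Solution | March 2023/Day 15/Special Palindrome Substrings/special-palindrome-substrings.py | f
-- ===== SOURCE A (Python) =====
-- def f(a,b,strt,end) :
--     ans=0;
--     i=0
--     j=len(a)-1
--     while i<=j :
--         if i>=strt and i<=end :
--             if j>=strt and j<=end :
--                 if b[i-strt]!=b[j-strt] : return -1;
--                 if a[i]!=b[i-strt] : ans+=1
--                 if a[j]!=b[j-strt] and i!=j : ans+=1
--             else :
--                 if a[i]!=b[i-strt] : ans+=1
--                 if b[i-strt]!=a[j] and i!=j : ans+=1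
--         else :
--             if j>=strt and j<=end :
--                 if a[j]!=b[j-strt] : ans+=1
--                 if b[j-strt]!=a[i] and i!=j : ans+=1
--             else :
--                 if a[i]!=a[j] : ans+=1
--         i+=1
--         j-=1
--     return ans;
-- ===== SOURCE B (Python) =====
-- def f(a, b, strt, end):
--     n = len(a)
--     c = list(a)
--     changes = 0
--     for k in range(max(strt, 0), min(end, n - 1) + 1):
--         ch = b[k - strt]
--         if a[k] != ch:
--             changes += 1
--         c[k] = ch
--     i, j = 0, n - 1
--     mism = 0
--     while i < j:
--         if c[i] != c[j]:
--             if strt <= i <= end and strt <= j <= end: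
--                 return -1
--             mism += 1
--         i += 1
--         j -= 1
--     return changes + mism
-- ===== Notes on version B (the rewrite author's own statement) =====
-- stated objective: simpler
-- what changed: A's single two-pointer pass with four-way window casework at both ends is split into two plain passes: one window loop that builds the effective string and counts replacement changes, then a separate two-pointer palindrome-mismatch scan over the effective string (returning -1 only when a mismatched pair lies entirely inside the window).
import Mathlib
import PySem

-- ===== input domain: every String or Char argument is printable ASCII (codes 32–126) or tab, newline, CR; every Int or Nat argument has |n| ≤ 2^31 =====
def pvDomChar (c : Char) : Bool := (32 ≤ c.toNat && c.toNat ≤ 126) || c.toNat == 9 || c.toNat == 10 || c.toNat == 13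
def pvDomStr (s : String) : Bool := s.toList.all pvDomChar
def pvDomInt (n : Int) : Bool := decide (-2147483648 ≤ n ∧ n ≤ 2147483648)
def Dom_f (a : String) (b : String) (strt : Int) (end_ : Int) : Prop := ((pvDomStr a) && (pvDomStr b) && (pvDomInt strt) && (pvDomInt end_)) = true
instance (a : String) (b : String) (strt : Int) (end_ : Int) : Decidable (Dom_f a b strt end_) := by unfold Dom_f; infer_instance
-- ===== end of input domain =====

-- B replaces A's single intertwined two-pointer pass (four-way window casework) by two plain passes:
-- build the effective string and count window changes, then a separate palindrome-mismatch scan (objective: simpler).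

-- s[k] for a 0-or-positive index; every access executed under Pre_f is in range, so the
-- default ' ' (Python: IndexError) is never the value the claim is about.
def pvGetC (l : List Char) (k : Int) : Char := (PySem.List.pyGet? l k).getD ' '

-- ===== PORT A =====
-- the while i<=j loop of A, step for step
def fLoop (la lb : List Char) (strt end_ : Int) (i j ans : Int) : Int :=
  if _h : i ≤ j then
    if strt ≤ i ∧ i ≤ end_ then
      if strt ≤ j ∧ j ≤ end_ then
        if pvGetC lb (i - strt) ≠ pvGetC lb (j - strt) then -1
        else
          fLoop la lb strt end_ (i + 1) (j - 1)
            (ans + (if pvGetC la i ≠ pvGetC lb (i - strt) then 1 else 0) +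
              (if pvGetC la j ≠ pvGetC lb (j - strt) ∧ i ≠ j then 1 else 0))
      else
        fLoop la lb strt end_ (i + 1) (j - 1)
          (ans + (if pvGetC la i ≠ pvGetC lb (i - strt) then 1 else 0) +
            (if pvGetC lb (i - strt) ≠ pvGetC la j ∧ i ≠ j then 1 else 0))
    else
      if strt ≤ j ∧ j ≤ end_ then
        fLoop la lb strt end_ (i + 1) (j - 1)
          (ans + (if pvGetC la j ≠ pvGetC lb (j - strt) then 1 else 0) +
            (if pvGetC lb (j - strt) ≠ pvGetC la i ∧ i ≠ j then 1 else 0))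
      else
        fLoop la lb strt end_ (i + 1) (j - 1)
          (ans + (if pvGetC la i ≠ pvGetC la j then 1 else 0))
  else ans
termination_by (j - i + 1).toNat
decreasing_by all_goals omega

def f (a : String) (b : String) (strt : Int) (end_ : Int) : Int :=
  fLoop a.toList b.toList strt end_ 0 ((a.toList.length : Int) - 1) 0

-- ===== PORT B =====
-- B's window pass: for k in range(max(strt,0), min(end,n-1)+1): update c[k], count changes.
-- c.set k.toNat is exact for Python's c[k]=ch because 0 ≤ k < stop ≤ len(c) on every iteration.
def wLoop (la lb : List Char) (strt : Int) (k stop : Int) (c : List Char) (changes : Int) :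
    List Char × Int :=
  if _h : k < stop then
    let ch := pvGetC lb (k - strt)
    let changes1 := if pvGetC la k ≠ ch then changes + 1 else changes
    wLoop la lb strt (k + 1) stop (c.set k.toNat ch) changes1
  else (c, changes)
termination_by (stop - k).toNat
decreasing_by omega

-- B's mismatch scan; `none` encodes Python's early `return -1`.
def mLoop (c : List Char) (strt end_ : Int) (i j m : Int) : Option Int :=
  if _h : i < j then
    if pvGetC c i ≠ pvGetC c j then
      if strt ≤ i ∧ i ≤ end_ ∧ strt ≤ j ∧ j ≤ end_ then none
      else mLoop c strt end_ (i + 1) (j - 1) (m + 1)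
    else mLoop c strt end_ (i + 1) (j - 1) m
  else some m
termination_by (j - i).toNat
decreasing_by all_goals omega

def f_alt (a : String) (b : String) (strt : Int) (end_ : Int) : Int :=
  let la := a.toList
  let n : Int := la.length
  let p := wLoop la b.toList strt (max strt 0) (min end_ (n - 1) + 1) la 0
  match mLoop p.1 strt end_ 0 (n - 1) 0 with
  | none => -1
  | some m => p.2 + m

-- ===== PRECONDITION & SPEC =====
-- Exactly the inputs on which Python A returns (no IndexError): either the window
-- [strt,end] ∩ [0,len(a)-1] is empty, or its largest b-index min(end,len(a)-1)-strt is < len(b).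
def Pre_f (a : String) (b : String) (strt : Int) (end_ : Int) : Prop :=
  min end_ ((a.toList.length : Int) - 1) < max strt 0 ∨
  min end_ ((a.toList.length : Int) - 1) - strt < (b.toList.length : Int)
instance (a : String) (b : String) (strt : Int) (end_ : Int) : Decidable (Pre_f a b strt end_) := by
  unfold Pre_f; infer_instance

def pvWitness_f : String × String × Int × Int := ("abca", "xy", 1, 2)

def Spec_f (a : String) (b : String) (strt : Int) (end_ : Int) (out : Int) : Prop := out = f_alt a b strt end_
instance (a : String) (b : String) (strt : Int) (end_ : Int) (out : Int) : Decidable (Spec_f a b strt end_ out) := by unfold Spec_f; infer_instance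

-- ===== CLAIM (what is proved, stated in full; the proofs are below) =====
def Claim_equal_f : Prop := ∀ (a : String) (b : String) (strt : Int) (end_ : Int), Dom_f a b strt end_ → Pre_f a b strt end_ → Spec_f a b strt end_ (f a b strt end_)

-- ===== LEMMAS AND PROOFS =====

-- the effective character at k: b's if k is in the window, else a's
def cEff (la lb : List Char) (strt end_ k : Int) : Char :=
  if strt ≤ k ∧ k ≤ end_ then pvGetC lb (k - strt) else pvGetC la k

-- 1 iff position k changes when the window is overwritten by b
def chg (la lb : List Char) (strt k : Int) : Int :=
  if pvGetC la k ≠ pvGetC lb (k - strt) then 1 else 0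

-- window changes inside [i,j], accumulated from both ends like A's loop
def Wg (la lb : List Char) (strt end_ i j : Int) : Int :=
  if _h : i ≤ j then
    (if strt ≤ i ∧ i ≤ end_ then chg la lb strt i else 0) +
    (if (strt ≤ j ∧ j ≤ end_) ∧ i ≠ j then chg la lb strt j else 0) +
    Wg la lb strt end_ (i + 1) (j - 1)
  else 0
termination_by (j - i + 1).toNat
decreasing_by omega

theorem mLoop_shift (c : List Char) (strt end_ : Int) :
    ∀ (N : ℕ) (i j m : Int), (j - i).toNat ≤ N →
      mLoop c strt end_ i j m = (mLoop c strt end_ i j 0).map (m + ·) := by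
  intro N
  induction N with
  | zero =>
    intro i j m hN
    conv_lhs => rw [mLoop]
    conv_rhs => rw [mLoop]
    simp only [dif_neg (by omega : ¬ i < j), Option.map_some]
    norm_num
  | succ N ih =>
    intro i j m hN
    by_cases hij : i < j
    · conv_lhs => rw [mLoop]
      conv_rhs => rw [mLoop]
      simp only [dif_pos hij]
      split_ifs with h1 h2
      · rfl
      · rw [ih (i+1) (j-1) (m+1) (by omega), ih (i+1) (j-1) (0+1) (by omega)]
        cases mLoop c strt end_ (i+1) (j-1) 0 <;> (simp; try ring)
      · rw [ih (i+1) (j-1) m (by omega)]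
    · conv_lhs => rw [mLoop]
      conv_rhs => rw [mLoop]
      simp only [dif_neg hij, Option.map_some]
      norm_num

theorem fLoop_eq (la lb c : List Char) (strt end_ : Int) :
    ∀ (N : ℕ) (i j ans : Int), (j - i + 1).toNat ≤ N →
      (∀ t, i ≤ t → t ≤ j → pvGetC c t = cEff la lb strt end_ t) →
      fLoop la lb strt end_ i j ans =
        match mLoop c strt end_ i j 0 with
        | none => -1
        | some m => ans + Wg la lb strt end_ i j + m := by
  intro N
  induction N with
  | zero =>
    intro i j ans hN _
    have hm : mLoop c strt end_ i j 0 = some 0 := by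
      rw [mLoop, dif_neg (by omega : ¬ i < j)]
    have hW : Wg la lb strt end_ i j = 0 := by
      rw [Wg, dif_neg (by omega : ¬ i ≤ j)]
    rw [fLoop, dif_neg (by omega : ¬ i ≤ j), hm, hW]
    norm_num
  | succ N ih =>
    intro i j ans hN hc
    by_cases hij : i ≤ j
    · have hci : pvGetC c i = cEff la lb strt end_ i := hc i le_rfl hij
      have hcj : pvGetC c j = cEff la lb strt end_ j := hc j hij le_rfl
      rcases eq_or_lt_of_le hij with rfl | hlt
      · -- i = j : one final body of A, mLoop stops at once
        have hm : mLoop c strt end_ i i 0 = some 0 := by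
          rw [mLoop, dif_neg (lt_irrefl i)]
        have hm2 : mLoop c strt end_ (i + 1) (i - 1) 0 = some 0 := by
          rw [mLoop, dif_neg (by omega : ¬ (i:Int) + 1 < i - 1)]
        have hW0 : Wg la lb strt end_ (i + 1) (i - 1) = 0 := by
          rw [Wg, dif_neg (by omega : ¬ (i:Int) + 1 ≤ i - 1)]
        have hW : Wg la lb strt end_ i i =
            if strt ≤ i ∧ i ≤ end_ then chg la lb strt i else 0 := by
          rw [Wg, dif_pos le_rfl, hW0]
          simp
        have hcempty : ∀ t, i + 1 ≤ t → t ≤ i - 1 → pvGetC c t = cEff la lb strt end_ t :=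
          fun t h1 h2 => absurd (h1.trans h2) (by omega)
        conv_lhs => rw [fLoop]
        rw [dif_pos (le_refl i)]
        by_cases hw : strt ≤ i ∧ i ≤ end_
        · rw [if_pos hw, if_pos hw,
              if_neg (by simp : ¬ pvGetC lb (i - strt) ≠ pvGetC lb (i - strt)),
              ih (i + 1) (i - 1) _ (by omega) hcempty, hm2, hm, hW, hW0, if_pos hw]
          simp [chg]
        · rw [if_neg hw, if_neg hw,
              ih (i + 1) (i - 1) _ (by omega) hcempty, hm2, hm, hW, hW0, if_neg hw]
          simp
      · -- i < j
        have hne : i ≠ j := ne_of_lt hlt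
        have hc' : ∀ t, i + 1 ≤ t → t ≤ j - 1 → pvGetC c t = cEff la lb strt end_ t :=
          fun t ht1 ht2 => hc t (by omega) (by omega)
        have hW : Wg la lb strt end_ i j =
            (if strt ≤ i ∧ i ≤ end_ then chg la lb strt i else 0) +
            (if (strt ≤ j ∧ j ≤ end_) ∧ i ≠ j then chg la lb strt j else 0) +
            Wg la lb strt end_ (i + 1) (j - 1) := by
          conv_lhs => rw [Wg]
          rw [dif_pos hij]
        conv_lhs => rw [fLoop]
        rw [dif_pos hij]
        by_cases hwi : strt ≤ i ∧ i ≤ end_ <;> by_cases hwj : strt ≤ j ∧ j ≤ end_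
        · -- both endpoints in the window
          rw [if_pos hwi, if_pos hwj]
          have hcc : (pvGetC c i ≠ pvGetC c j) ↔
              (pvGetC lb (i - strt) ≠ pvGetC lb (j - strt)) := by
            rw [hci, hcj]
            unfold cEff
            rw [if_pos hwi, if_pos hwj]
          by_cases hbb : pvGetC lb (i - strt) ≠ pvGetC lb (j - strt)
          · have hm : mLoop c strt end_ i j 0 = none := by
              rw [mLoop, dif_pos hlt, if_pos (hcc.mpr hbb),
                  if_pos (⟨hwi.1, hwi.2, hwj⟩ : strt ≤ i ∧ i ≤ end_ ∧ strt ≤ j ∧ j ≤ end_)]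
            rw [if_pos hbb, hm]
          · have hm : mLoop c strt end_ i j 0 = mLoop c strt end_ (i + 1) (j - 1) 0 := by
              rw [mLoop, dif_pos hlt,
                  if_neg (show ¬ (pvGetC c i ≠ pvGetC c j) from fun hx => hbb (hcc.mp hx))]
            rw [if_neg hbb, ih (i + 1) (j - 1) _ (by omega) hc', hm, hW]
            cases mLoop c strt end_ (i + 1) (j - 1) 0 with
            | none => rfl
            | some m =>
              simp only [and_iff_left hne, if_pos hwi, if_pos hwj]
              unfold chg
              ring
        · -- i in the window, j not
          rw [if_pos hwi, if_neg hwj]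
          have hcc : (pvGetC c i ≠ pvGetC c j) ↔
              (pvGetC lb (i - strt) ≠ pvGetC la j) := by
            rw [hci, hcj]
            unfold cEff
            rw [if_pos hwi, if_neg hwj]
          by_cases hmm : pvGetC lb (i - strt) ≠ pvGetC la j
          · have hm : mLoop c strt end_ i j 0 =
                (mLoop c strt end_ (i + 1) (j - 1) 0).map (0 + 1 + ·) := by
              rw [mLoop, dif_pos hlt, if_pos (hcc.mpr hmm),
                  if_neg (show ¬ (strt ≤ i ∧ i ≤ end_ ∧ strt ≤ j ∧ j ≤ end_) from
                    fun h => hwj h.2.2),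
                  mLoop_shift c strt end_ N (i + 1) (j - 1) (0 + 1) (by omega)]
            rw [ih (i + 1) (j - 1) _ (by omega) hc', hm, hW]
            cases mLoop c strt end_ (i + 1) (j - 1) 0 with
            | none => rfl
            | some m =>
              simp only [Option.map_some, and_iff_left hne, if_pos hmm, if_pos hwi,
                if_neg hwj]
              unfold chg
              ring
          · have hm : mLoop c strt end_ i j 0 = mLoop c strt end_ (i + 1) (j - 1) 0 := by
              rw [mLoop, dif_pos hlt,
                  if_neg (show ¬ (pvGetC c i ≠ pvGetC c j) from fun hx => hmm (hcc.mp hx))]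
            rw [ih (i + 1) (j - 1) _ (by omega) hc', hm, hW]
            cases mLoop c strt end_ (i + 1) (j - 1) 0 with
            | none => rfl
            | some m =>
              simp only [and_iff_left hne, if_neg hmm, if_pos hwi, if_neg hwj]
              unfold chg
              ring
        · -- j in the window, i not
          rw [if_neg hwi, if_pos hwj]
          have hcc : (pvGetC c i ≠ pvGetC c j) ↔
              (pvGetC lb (j - strt) ≠ pvGetC la i) := by
            rw [hci, hcj]
            unfold cEff
            rw [if_neg hwi, if_pos hwj]
            constructor <;> exact fun h1 h2 => h1 h2.symm
          by_cases hmm : pvGetC lb (j - strt) ≠ pvGetC la i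
          · have hm : mLoop c strt end_ i j 0 =
                (mLoop c strt end_ (i + 1) (j - 1) 0).map (0 + 1 + ·) := by
              rw [mLoop, dif_pos hlt, if_pos (hcc.mpr hmm),
                  if_neg (show ¬ (strt ≤ i ∧ i ≤ end_ ∧ strt ≤ j ∧ j ≤ end_) from
                    fun h => hwi ⟨h.1, h.2.1⟩),
                  mLoop_shift c strt end_ N (i + 1) (j - 1) (0 + 1) (by omega)]
            rw [ih (i + 1) (j - 1) _ (by omega) hc', hm, hW]
            cases mLoop c strt end_ (i + 1) (j - 1) 0 with
            | none => rfl
            | some m =>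
              simp only [Option.map_some, and_iff_left hne, if_pos hmm, if_neg hwi,
                if_pos hwj]
              unfold chg
              ring
          · have hm : mLoop c strt end_ i j 0 = mLoop c strt end_ (i + 1) (j - 1) 0 := by
              rw [mLoop, dif_pos hlt,
                  if_neg (show ¬ (pvGetC c i ≠ pvGetC c j) from fun hx => hmm (hcc.mp hx))]
            rw [ih (i + 1) (j - 1) _ (by omega) hc', hm, hW]
            cases mLoop c strt end_ (i + 1) (j - 1) 0 with
            | none => rfl
            | some m =>
              simp only [and_iff_left hne, if_neg hmm, if_neg hwi, if_pos hwj]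
              unfold chg
              ring
        · -- neither endpoint in the window
          rw [if_neg hwi, if_neg hwj]
          have hcc : (pvGetC c i ≠ pvGetC c j) ↔ (pvGetC la i ≠ pvGetC la j) := by
            rw [hci, hcj]
            unfold cEff
            rw [if_neg hwi, if_neg hwj]
          by_cases hmm : pvGetC la i ≠ pvGetC la j
          · have hm : mLoop c strt end_ i j 0 =
                (mLoop c strt end_ (i + 1) (j - 1) 0).map (0 + 1 + ·) := by
              rw [mLoop, dif_pos hlt, if_pos (hcc.mpr hmm),
                  if_neg (show ¬ (strt ≤ i ∧ i ≤ end_ ∧ strt ≤ j ∧ j ≤ end_) from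
                    fun h => hwi ⟨h.1, h.2.1⟩),
                  mLoop_shift c strt end_ N (i + 1) (j - 1) (0 + 1) (by omega)]
            rw [ih (i + 1) (j - 1) _ (by omega) hc', hm, hW]
            cases mLoop c strt end_ (i + 1) (j - 1) 0 with
            | none => rfl
            | some m =>
              simp only [Option.map_some, and_iff_left hne, if_pos hmm, if_neg hwi,
                if_neg hwj]
              ring
          · have hm : mLoop c strt end_ i j 0 = mLoop c strt end_ (i + 1) (j - 1) 0 := by
              rw [mLoop, dif_pos hlt,
                  if_neg (show ¬ (pvGetC c i ≠ pvGetC c j) from fun hx => hmm (hcc.mp hx))]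
            rw [ih (i + 1) (j - 1) _ (by omega) hc', hm, hW]
            cases mLoop c strt end_ (i + 1) (j - 1) 0 with
            | none => rfl
            | some m =>
              simp only [and_iff_left hne, if_neg hmm, if_neg hwi, if_neg hwj]
              ring
    · have hm : mLoop c strt end_ i j 0 = some 0 := by
        rw [mLoop, dif_neg (by omega : ¬ i < j)]
      have hW : Wg la lb strt end_ i j = 0 := by
        rw [Wg, dif_neg hij]
      rw [fLoop, dif_neg hij, hm, hW]
      norm_num

-- Wg as a Finset sum over the interval
theorem Wg_eq_sum (la lb : List Char) (strt end_ : Int) :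
    ∀ (N : ℕ) (i j : Int), (j - i + 1).toNat ≤ N →
      Wg la lb strt end_ i j =
        ∑ k ∈ Finset.Icc i j, (if strt ≤ k ∧ k ≤ end_ then chg la lb strt k else 0) := by
  intro N
  induction N with
  | zero =>
    intro i j hN
    rw [Wg]
    rw [dif_neg (by omega : ¬ i ≤ j), Finset.Icc_eq_empty (by omega), Finset.sum_empty]
  | succ N ih =>
    intro i j hN
    by_cases hij : i ≤ j
    · rcases eq_or_lt_of_le hij with rfl | hlt
      · rw [Wg]
        rw [dif_pos le_rfl, Finset.Icc_self, Finset.sum_singleton,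
            ih (i+1) (i-1) (by omega)]
        rw [Finset.Icc_eq_empty (by omega), Finset.sum_empty]
        simp only [ne_eq, not_true_eq_false, and_false, if_false]
        ring
      · have hset : Finset.Icc i j = insert i (insert j (Finset.Icc (i+1) (j-1))) := by
          ext x
          simp only [Finset.mem_Icc, Finset.mem_insert]
          omega
        rw [Wg, dif_pos hij, hset,
            Finset.sum_insert (by simp only [Finset.mem_insert, Finset.mem_Icc]; omega),
            Finset.sum_insert (by simp only [Finset.mem_Icc]; omega),
            ih (i+1) (j-1) (by omega)]
        have : ((strt ≤ j ∧ j ≤ end_) ∧ i ≠ j) ↔ (strt ≤ j ∧ j ≤ end_) := by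
          constructor
          · exact fun h => h.1
          · exact fun h => ⟨h, by omega⟩
        rw [if_congr this rfl rfl]
        ring
    · rw [Wg, dif_neg hij, Finset.Icc_eq_empty (by omega), Finset.sum_empty]

-- wLoop's counter accumulates the changes over [k, stop-1]
theorem wLoop_snd (la lb : List Char) (strt : Int) :
    ∀ (N : ℕ) (k stop : Int) (c : List Char) (ch : Int), (stop - k).toNat ≤ N →
      (wLoop la lb strt k stop c ch).2 = ch + ∑ t ∈ Finset.Icc k (stop - 1), chg la lb strt t := by
  intro N
  induction N with
  | zero =>
    intro k stop c ch hN
    rw [wLoop, dif_neg (by omega : ¬ k < stop), Finset.Icc_eq_empty (by omega), Finset.sum_empty]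
    ring
  | succ N ih =>
    intro k stop c ch hN
    by_cases hk : k < stop
    · rw [wLoop, dif_pos hk]
      rw [ih (k+1) stop _ _ (by omega)]
      have hset : Finset.Icc k (stop - 1) = insert k (Finset.Icc (k+1) (stop - 1)) := by
        ext x
        simp only [Finset.mem_Icc, Finset.mem_insert]
        omega
      rw [hset, Finset.sum_insert (by simp only [Finset.mem_Icc]; omega)]
      unfold chg
      split_ifs <;> ring
    · rw [wLoop, dif_neg hk, Finset.Icc_eq_empty (by omega), Finset.sum_empty]
      ring

theorem pvGetC_set (c : List Char) (m t : Int) (x : Char) (hm0 : 0 ≤ m)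
    (hm : m < (c.length : Int)) (ht : 0 ≤ t) :
    pvGetC (c.set m.toNat x) t = if t = m then x else pvGetC c t := by
  have hlen : m.toNat < c.length := by omega
  unfold pvGetC
  rw [PySem.List.pyGet?_of_nonneg _ ht, PySem.List.pyGet?_of_nonneg _ ht,
      List.getElem?_set, if_pos hlen]
  split_ifs with h1 h2 h2
  · rfl
  · omega
  · omega
  · rfl

-- wLoop rewrites exactly the positions in [k, stop)
theorem wLoop_fst (la lb : List Char) (strt : Int) :
    ∀ (N : ℕ) (k stop : Int) (c : List Char) (ch : Int) (t : Int),
      (stop - k).toNat ≤ N → 0 ≤ k → stop ≤ (c.length : Int) → 0 ≤ t →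
      pvGetC (wLoop la lb strt k stop c ch).1 t =
        if k ≤ t ∧ t < stop then pvGetC lb (t - strt) else pvGetC c t := by
  intro N
  induction N with
  | zero =>
    intro k stop c ch t hN hk hs ht
    rw [wLoop, dif_neg (by omega : ¬ k < stop), if_neg (by omega)]
  | succ N ih =>
    intro k stop c ch t hN hk hs ht
    by_cases hkk : k < stop
    · rw [wLoop, dif_pos hkk]
      rw [ih (k+1) stop _ _ t (by omega) (by omega)
            (by rw [List.length_set]; exact hs) ht]
      rw [pvGetC_set c k t _ hk (by omega) ht]
      split_ifs with h1 h2 h2 <;> first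
        | rfl
        | (subst h2; rfl)
        | omega
    · rw [wLoop, dif_neg hkk, if_neg (by omega)]

-- the two sum shapes agree: indicator over [0,n-1] vs plain sum over the clipped window
theorem sum_window (la lb : List Char) (strt end_ : Int) (n : Int) :
    ∑ k ∈ Finset.Icc 0 (n - 1), (if strt ≤ k ∧ k ≤ end_ then chg la lb strt k else 0) =
      ∑ k ∈ Finset.Icc (max strt 0) (min end_ (n - 1)), chg la lb strt k := by
  rw [← Finset.sum_filter]
  congr 1
  ext x
  simp only [Finset.mem_filter, Finset.mem_Icc]
  omega

-- ===== VERDICT (by name: the statement is the Claim_ definition above) =====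
theorem f_spec : Claim_equal_f := by
  intro a b strt end_ _hdom _hpre
  unfold Spec_f f
  simp only [f_alt]
  set la := a.toList with hla
  set lb := b.toList with hlb
  set p := wLoop la lb strt (max strt 0) (min end_ ((la.length : Int) - 1) + 1) la 0 with hp
  have hstop : min end_ ((la.length : Int) - 1) + 1 ≤ (la.length : Int) := by omega
  have hc : ∀ t, (0:Int) ≤ t → t ≤ (la.length : Int) - 1 →
      pvGetC p.1 t = cEff la lb strt end_ t := by
    intro t ht0 ht1
    rw [hp, wLoop_fst la lb strt
          (min end_ ((la.length : Int) - 1) + 1 - max strt 0).toNat _ _ _ _ t le_rfl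
          (by omega) hstop ht0]
    unfold cEff
    split_ifs with h1 h2 h2 <;> first | rfl | omega
  have hch : p.2 = Wg la lb strt end_ 0 ((la.length : Int) - 1) := by
    rw [hp, wLoop_snd la lb strt
          (min end_ ((la.length : Int) - 1) + 1 - max strt 0).toNat _ _ _ _ le_rfl]
    rw [Wg_eq_sum la lb strt end_ ((la.length : Int) - 1 - 0 + 1).toNat 0
          ((la.length : Int) - 1) le_rfl, sum_window]
    simp only [add_sub_cancel_right]
    ring
  rw [fLoop_eq la lb p.1 strt end_ ((la.length : Int) - 1 - 0 + 1).toNat 0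
        ((la.length : Int) - 1) 0 le_rfl hc, hch]
  cases mLoop p.1 strt end_ 0 ((la.length : Int) - 1) 0 with
  | none => rfl
  | some m => simp
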